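-- pv_equiv track=rewrite | github.com/EMBL-Hentze-group/Shoji | clip-savvy/gene.py | _get_intron_pos
-- ===== SOURCE A (Python) =====
-- from typing import Callable, Dict, Generator, List, Set, Tuple
--
-- def _get_intron_pos(exons: List[Tuple[int, int]]) -> List[Tuple[int, int]]:
--     """_get_intron_pos generate intron co-ordinates
--     Generate intron co-ordinates from a list of exon co-ordinates
--     Args:
--         exons:  List[Tuple[begin,end]] list of exon begin and end positions
--
--     Returns:
--         List[Tuple[begin,end]] list of intron begin and end positions
--     """
--     prev_end = 0
--     introns: List[Tuple[int, int]] = list()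
--     for i, (begin, end) in enumerate(exons):
--         if i == 0:
--             prev_end = end
--             continue
--         if begin > prev_end:
--             introns.append((prev_end, begin))
--         prev_end = end
--     return introns
-- ===== SOURCE B (Python) =====
-- def _get_intron_pos(exons):
--     # Flatten exon pairs into one boundary list; the interior boundaries
--     # (everything but the first begin and the last end) alternate
--     # (exon_end, next_exon_begin); scan them two at a time.
--     bounds = [x for exon in exons for x in exon]
--     interior = bounds[1:-1]
--     introns = []
--     k = 0
--     while k + 1 < len(interior):
--         if interior[k + 1] > interior[k]:
--             introns.append((interior[k], interior[k + 1]))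
--         k += 2
--     return introns
-- ===== Notes on version B (the rewrite author's own statement) =====
-- stated objective: alternative
-- what changed: Instead of a carried prev_end state over (begin,end) pairs, B flattens the exons into one boundary list, trims the outer gene boundaries with [1:-1], and scans the flat interior list with a stride-2 index loop pairing adjacent boundaries.
import Mathlib
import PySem

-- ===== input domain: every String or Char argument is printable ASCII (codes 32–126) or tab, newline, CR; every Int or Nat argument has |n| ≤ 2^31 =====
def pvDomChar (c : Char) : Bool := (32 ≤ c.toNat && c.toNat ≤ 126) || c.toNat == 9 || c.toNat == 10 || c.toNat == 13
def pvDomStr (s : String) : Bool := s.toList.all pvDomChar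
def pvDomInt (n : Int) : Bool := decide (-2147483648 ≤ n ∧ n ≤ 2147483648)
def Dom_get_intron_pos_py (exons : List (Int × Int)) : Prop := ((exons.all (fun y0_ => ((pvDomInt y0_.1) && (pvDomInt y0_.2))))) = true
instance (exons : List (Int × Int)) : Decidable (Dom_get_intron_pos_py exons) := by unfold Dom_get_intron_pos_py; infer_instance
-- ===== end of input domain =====

-- B replaces A's prev_end-state loop over (begin,end) pairs by flattening the exons into one
-- boundary list, trimming the outer gene boundaries with [1:-1], and scanning the flat interior
-- list with a stride-2 index loop (objective: alternative decomposition, same cost).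

-- ===== PORT A =====
-- literal port of A: fold over enumerate(exons) carrying (prev_end, introns); i == 0 sets prev_end only
def get_intron_pos_py (exons : List (Int × Int)) : List (Int × Int) :=
  ((PySem.List.enumerate exons).foldl
    (fun (st : Int × List (Int × Int)) p =>
      if p.1 == 0 then (p.2.2, st.2)
      else (p.2.2, if p.2.1 > st.1 then st.2 ++ [(st.1, p.2.1)] else st.2))
    (0, [])).2

-- ===== PORT B =====
-- port of B's while loop `while k + 1 < len(interior): … k += 2`; k is a Nat since it starts at 0
-- and only grows; interior[k] / interior[k+1] are in range whenever the guard holds, so getD is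
-- exact there (Python would raise only out of range, which the guard excludes).
def pvBoundsLoop (interior : List Int) (acc : List (Int × Int)) (k : Nat) : List (Int × Int) :=
  if k + 1 < interior.length then
    pvBoundsLoop interior
      (if interior.getD (k + 1) 0 > interior.getD k 0 then
        acc ++ [(interior.getD k 0, interior.getD (k + 1) 0)]
      else acc)
      (k + 2)
  else acc
termination_by interior.length - k

-- port of B: flatten to a boundary list, trim with [1:-1], stride-2 scan
def get_intron_pos_py_alt (exons : List (Int × Int)) : List (Int × Int) :=
  let bounds := exons.flatMap (fun exon => [exon.1, exon.2])
  let interior := PySem.List.slice bounds (some 1) (some (-1))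
  pvBoundsLoop interior [] 0

-- ===== PRECONDITION & SPEC =====
def Spec_get_intron_pos_py (exons : List (Int × Int)) (out : List (Int × Int)) : Prop := out = get_intron_pos_py_alt exons
instance (exons : List (Int × Int)) (out : List (Int × Int)) : Decidable (Spec_get_intron_pos_py exons out) := by unfold Spec_get_intron_pos_py; infer_instance

-- ===== CLAIM (what is proved, stated in full; the proofs are below) =====
def Claim_equal_get_intron_pos_py : Prop := ∀ (exons : List (Int × Int)), Dom_get_intron_pos_py exons → Spec_get_intron_pos_py exons (get_intron_pos_py exons)

-- ===== LEMMAS AND PROOFS =====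

-- xs[1:-1] is tail-then-dropLast
theorem pv_slice_one_neg_one (xs : List Int) :
    PySem.List.slice xs (some 1) (some (-1)) = xs.tail.dropLast := by
  cases xs with
  | nil => simp [PySem.List.slice, PySem.List.clampIdx]
  | cons x t =>
      simp [PySem.List.slice, PySem.List.clampIdx, List.dropLast_eq_take]
      split_ifs with h <;> omega

-- starting B's scan at index k + 2 is the same as dropping the first two boundaries
theorem pv_loop_shift (n : Nat) : ∀ (a b : Int) (rest : List Int) (acc : List (Int × Int)) (k : Nat),
    rest.length - k ≤ n →
    pvBoundsLoop (a :: b :: rest) acc (k + 2) = pvBoundsLoop rest acc k := by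
  induction n with
  | zero =>
      intro a b rest acc k h
      have h1 : ¬ (k + 2 + 1 < (a :: b :: rest).length) := by simp; omega
      have h2 : ¬ (k + 1 < rest.length) := by omega
      rw [pvBoundsLoop, if_neg h1, pvBoundsLoop, if_neg h2]
  | succ m ih =>
      intro a b rest acc k h
      by_cases hk : k + 1 < rest.length
      · have h1 : k + 2 + 1 < (a :: b :: rest).length := by simp; omega
        have e1 : (a :: b :: rest).getD (k + 2) 0 = rest.getD k 0 := by simp
        have e2 : (a :: b :: rest).getD (k + 2 + 1) 0 = rest.getD (k + 1) 0 := by simp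
        conv_lhs => rw [pvBoundsLoop]
        conv_rhs => rw [pvBoundsLoop]
        rw [if_pos h1, if_pos hk, e1, e2]
        exact ih a b rest _ (k + 2) (by omega)
      · have h1 : ¬ (k + 2 + 1 < (a :: b :: rest).length) := by simp; omega
        rw [pvBoundsLoop, if_neg h1, pvBoundsLoop, if_neg hk]

-- A's fold over the tail (indices ≥ 1, so the i == 0 branch never fires), started just after
-- exon `prev`, equals B's stride-2 scan of the interior boundary list after `prev`'s end.
theorem pv_main (xs : List (Int × Int)) : ∀ (prev : Int × Int) (acc : List (Int × Int)) (s : Int),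
    1 ≤ s →
    ((PySem.List.enumerate xs s).foldl
      (fun (st : Int × List (Int × Int)) p =>
        if p.1 == 0 then (p.2.2, st.2)
        else (p.2.2, if p.2.1 > st.1 then st.2 ++ [(st.1, p.2.1)] else st.2))
      (prev.2, acc)).2 =
    pvBoundsLoop ((prev.2 :: xs.flatMap (fun exon => [exon.1, exon.2])).dropLast) acc 0 := by
  induction xs with
  | nil =>
      intro prev acc s hs
      rw [pvBoundsLoop]
      simp [PySem.List.enumerate]
  | cons b tl ih =>
      intro prev acc s hs
      have hne : (s == 0) = false := by simp; omega
      simp only [PySem.List.enumerate_cons, List.foldl_cons, hne, Bool.false_eq_true, if_false,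
        List.flatMap_cons, List.cons_append, List.nil_append]
      rw [List.dropLast_cons₂, List.dropLast_cons₂]
      rw [pvBoundsLoop]
      have hlen : 0 + 1 < (prev.2 :: b.1 :: (b.2 :: tl.flatMap (fun exon => [exon.1, exon.2])).dropLast).length := by
        simp
      rw [if_pos hlen]
      simp only [List.getD_cons_succ, List.getD_cons_zero]
      rw [pv_loop_shift ((b.2 :: tl.flatMap (fun exon => [exon.1, exon.2])).dropLast).length]
      · exact ih b _ (s + 1) (by omega)
      · omega

-- ===== VERDICT (by name: the statement is the Claim_ definition above) =====
theorem get_intron_pos_py_spec : Claim_equal_get_intron_pos_py := by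
  intro exons _
  unfold Spec_get_intron_pos_py get_intron_pos_py get_intron_pos_py_alt
  cases exons with
  | nil => simp [PySem.List.enumerate, pv_slice_one_neg_one, pvBoundsLoop]
  | cons hd tl =>
      simp only [PySem.List.enumerate_cons, List.foldl_cons, beq_self_eq_true, if_true,
        pv_slice_one_neg_one, List.flatMap_cons, List.cons_append, List.tail_cons]
      exact pv_main tl hd [] 1 le_rfl
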